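/- GENERATED by farm/mkstatement.py from design/units.tsv (unit `start_decoder.C5a`) and the assertions of Vorbis/Spec/StartDecoderC5.lean — do not edit.
   THE STATEMENT of the proof unit `start_decoder.C5a`: segment C5a of `start_decoder` (28 instructions; entries 0x114594;
   exits 0x114668,0x11484a,0x1145e9; ranges 0x114594-0x1145e4 + 0x114651-0x114662 + 0x11483c-0x114844)
   takes each of its entry assertions to one of its exit assertions (`Vorbis.Spec.StartDecoder.SegC5a`), given the contracts of its callees.
   What the names mean: Vorbis/Spec/Basic.lean (the shared hypotheses), Vorbis/Spec/StartDecoderC5.lean (the assertions). The theorem to prove: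
   `theorem start_decoder_C5a_ok : Vorbis.Spec.start_decoder_C5a.Statement`. -/
import Vorbis.Spec.Alloc
import Vorbis.Spec.StartDecoderC5
namespace Vorbis.Spec.start_decoder_C5a
open X86 X86.User Asan

/-- The statement of unit `start_decoder.C5a`. -/
def Statement : Prop :=
  ∀ (Lay : Layout) (_hLay : Lay.hi = 0x1000000) (μ : Microarch) (_hμ : UserX.MicroOK μ) (u₀ : State)
    (_hcode : HasCodeNat Lay u₀ Vorbis.L.start_decoder.entry Vorbis.Code.code_start_decoder.nat Vorbis.L.start_decoder.size)
    (_h_asan_load1_noabort : Asan.SmallCheck Lay μ Vorbis.WayInv (Vorbis.CodeOK u₀) [.rax, .rdx] 1 Vorbis.L.__asan_load1_noabort.entry)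
    (_h_asan_load4_noabort : Asan.SmallCheck Lay μ Vorbis.WayInv (Vorbis.CodeOK u₀) [.rax, .rcx, .rdx] 4 Vorbis.L.__asan_load4_noabort.entry)
    (_h_setup_malloc : ∀ (others : List Obj) (frames : List (Nat × FrameLayout)) (A : Arena), Calls Lay μ Vorbis.WayInv (Vorbis.conv u₀) Vorbis.L.setup_malloc.entry (Vorbis.Spec.setup_malloc.spec others frames A)),
    Vorbis.Spec.StartDecoder.SegC5a Lay μ u₀

end Vorbis.Spec.start_decoder_C5a
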